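-- pv_equiv track=rewrite | github.com/Tang4109/NLP | 7.3 开发和评估分块器.py | tags_since_dt
-- ===== SOURCE A (Python) =====
-- def tags_since_dt(tagged_sent, i):
--     tags = set()
--     for word, pos in tagged_sent[:i]:
--         if pos == 'DT':
--             tags = set()
--         else:
--             tags.add(pos)
--
--     return '+'.join(sorted(tags))
-- ===== SOURCE B (Python) =====
-- def tags_since_dt(tagged_sent, i):
--     # Backward scan: walk from the end of the slice toward the front and stop
--     # at the first 'DT' seen, instead of resetting a forward accumulator.
--     n = len(tagged_sent)
--     j = i + n if i < 0 else i
--     if j > n: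
--         j = n
--     tags = set()
--     for k in range(j - 1, -1, -1):
--         pos = tagged_sent[k][1]
--         if pos == 'DT':
--             break
--         tags.add(pos)
--     return '+'.join(sorted(tags))
-- ===== Notes on version B (the rewrite author's own statement) =====
-- stated objective: alternative
-- what changed: Instead of A's forward scan over tagged_sent[:i] that resets the accumulated set at every 'DT', B walks backward from the end of the slice and stops at the first 'DT' it meets, collecting the same set of tags after the last 'DT'.
import Mathlib
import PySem

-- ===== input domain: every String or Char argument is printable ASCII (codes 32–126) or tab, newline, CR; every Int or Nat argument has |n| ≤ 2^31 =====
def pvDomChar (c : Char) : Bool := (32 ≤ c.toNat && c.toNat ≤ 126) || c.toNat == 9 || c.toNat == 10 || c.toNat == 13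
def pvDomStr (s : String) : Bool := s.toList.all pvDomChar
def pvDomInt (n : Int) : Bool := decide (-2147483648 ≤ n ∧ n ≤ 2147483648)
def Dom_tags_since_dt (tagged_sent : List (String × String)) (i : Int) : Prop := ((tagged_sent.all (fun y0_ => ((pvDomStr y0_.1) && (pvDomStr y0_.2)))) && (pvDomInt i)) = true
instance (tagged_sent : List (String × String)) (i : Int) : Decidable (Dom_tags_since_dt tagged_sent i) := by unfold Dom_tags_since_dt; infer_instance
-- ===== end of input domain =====

-- B replaces A's forward scan (which resets its set at every 'DT') by a backward index
-- loop over the slice that stops at the first 'DT' seen; objective: alternative.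

-- ===== PORT A =====
-- the loop body of A: reset on 'DT', otherwise add pos to the set
def tsdStepA (tags : PySem.Set String) (wp : String × String) : PySem.Set String :=
  if wp.2 == "DT" then PySem.Set.empty else PySem.Set.add tags wp.2

def tags_since_dt (tagged_sent : List (String × String)) (i : Int) : String :=
  let tags : PySem.Set String :=
    (PySem.List.slice tagged_sent none (some i)).foldl tsdStepA PySem.Set.empty
  PySem.Str.join "+" (PySem.List.sorted tags (fun x => x))

-- ===== PORT B =====
-- the backward index loop 'for k in range(j-1, -1, -1): … break on DT' of Source B
def tsdCollect (ts : List (String × String)) : Nat → PySem.Set String → PySem.Set String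
  | 0, tags => tags
  | k+1, tags =>
    if (ts.getD k ("", "")).2 == "DT" then tags
    else tsdCollect ts k (PySem.Set.add tags (ts.getD k ("", "")).2)

def tags_since_dt_alt (tagged_sent : List (String × String)) (i : Int) : String :=
  let n : Int := tagged_sent.length
  let j0 : Int := if i < 0 then i + n else i
  let j : Int := if j0 > n then n else j0
  PySem.Str.join "+"
    (PySem.List.sorted (tsdCollect tagged_sent j.toNat PySem.Set.empty) (fun x => x))

-- ===== PRECONDITION & SPEC =====
def Spec_tags_since_dt (tagged_sent : List (String × String)) (i : Int) (out : String) : Prop := out = tags_since_dt_alt tagged_sent i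
instance (tagged_sent : List (String × String)) (i : Int) (out : String) : Decidable (Spec_tags_since_dt tagged_sent i out) := by unfold Spec_tags_since_dt; infer_instance

-- ===== CLAIM (what is proved, stated in full; the proofs are below) =====
def Claim_equal_tags_since_dt : Prop := ∀ (tagged_sent : List (String × String)) (i : Int), Dom_tags_since_dt tagged_sent i → Spec_tags_since_dt tagged_sent i (tags_since_dt tagged_sent i)

-- ===== LEMMAS AND PROOFS =====

-- tags after the last 'DT', listed back-to-front
def tsdTW (P : List String) : List String := P.reverse.takeWhile (fun p => !(p == "DT"))

theorem tsd_nodup_add (s : PySem.Set String) (x : String) (h : s.Nodup) : (PySem.Set.add s x).Nodup := by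
  unfold PySem.Set.add
  split
  · exact h
  · next hc =>
    simp only [List.nodup_append, h, List.nodup_singleton, true_and]
    intro a ha b hb
    simp only [List.mem_singleton] at hb
    subst hb
    rintro rfl
    exact hc (by simpa [PySem.Set.contains] using ha)

theorem tsd_foldA_nodup (P : List (String × String)) (s : PySem.Set String) (h : s.Nodup) :
    (P.foldl tsdStepA s).Nodup := by
  induction P generalizing s with
  | nil => exact h
  | cons p P ih =>
    simp only [List.foldl_cons]
    apply ih
    unfold tsdStepA
    split
    · simp [PySem.Set.empty]
    · exact tsd_nodup_add s p.2 h

theorem tsd_collect_nodup (ts : List (String × String)) (k : Nat) (s : PySem.Set String) (h : s.Nodup) :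
    (tsdCollect ts k s).Nodup := by
  induction k generalizing s with
  | zero => exact h
  | succ k ih =>
    unfold tsdCollect
    split
    · exact h
    · exact ih _ (tsd_nodup_add s _ h)

theorem tsd_tw_cond (R : List String) :
    (((R.takeWhile (fun p => !(p == "DT"))).length = R.length) ↔ "DT" ∉ R) := by
  induction R with
  | nil => simp
  | cons a R ih =>
    by_cases ha : a = "DT"
    · subst ha
      simp
    · have ha' : ¬ ("DT" = a) := fun h => ha h.symm
      simp [ha, ha', ih]

theorem tsd_tw_self (R : List String) (h : "DT" ∉ R) :
    R.takeWhile (fun p => !(p == "DT")) = R := by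
  rw [List.takeWhile_eq_self_iff]
  intro x hx
  simp only [Bool.not_eq_eq_eq_not, Bool.not_true, beq_eq_false_iff_ne, ne_eq]
  rintro rfl
  exact h hx

theorem tsd_foldA_mem (P : List (String × String)) (s : PySem.Set String) (x : String) :
    x ∈ P.foldl tsdStepA s ↔
      x ∈ tsdTW (P.map Prod.snd) ∨ ("DT" ∉ P.map Prod.snd ∧ x ∈ s) := by
  induction P generalizing s with
  | nil => simp [tsdTW]
  | cons p P ih =>
    simp only [List.foldl_cons, ih]
    unfold tsdTW
    simp only [List.map_cons, List.reverse_cons, List.takeWhile_append]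
    by_cases hDT : "DT" ∈ P.map Prod.snd
    · have hmr : "DT" ∈ (P.map Prod.snd).reverse := by simpa using hDT
      have hcond : ¬ (((P.map Prod.snd).reverse.takeWhile (fun p => !(p == "DT"))).length
          = (P.map Prod.snd).reverse.length) := by
        rw [tsd_tw_cond]; simpa using hmr
      rw [if_neg (by simpa using hcond)]
      simp [hDT]
    · have hmr : "DT" ∉ (P.map Prod.snd).reverse := by simpa using hDT
      have hcond : (((P.map Prod.snd).reverse.takeWhile (fun p => !(p == "DT"))).length
          = (P.map Prod.snd).reverse.length) := by
        rw [tsd_tw_cond]; exact hmr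
      rw [if_pos (by simpa using hcond)]
      rw [tsd_tw_self _ hmr]
      unfold tsdStepA
      by_cases hp : p.2 = "DT"
      · simp [hp, PySem.Set.empty, hDT, List.mem_reverse]
      · have hb : (!(p.2 == "DT")) = true := by simp [hp]
        have hp' : ¬ ("DT" = p.2) := fun h => hp h.symm
        simp only [beq_iff_eq, hp, if_false, PySem.Set.mem_add, List.takeWhile_cons, hb, if_true]
        simp only [List.mem_append, List.mem_reverse, List.mem_cons, 
          List.takeWhile_nil, List.not_mem_nil, or_false, hDT, hp', not_false_iff,
          true_and]
        tauto

theorem tsd_collect_mem (ts : List (String × String)) (k : Nat) (hk : k ≤ ts.length)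
    (s : PySem.Set String) (x : String) :
    x ∈ tsdCollect ts k s ↔ x ∈ tsdTW ((ts.take k).map Prod.snd) ∨ x ∈ s := by
  induction k generalizing s with
  | zero => simp [tsdCollect, tsdTW]
  | succ k ih =>
    have hklt : k < ts.length := by omega
    have hget : ts.getD k ("", "") = ts[k] := List.getD_eq_getElem ts ("", "") hklt
    have htake : ts.take (k+1) = ts.take k ++ [ts[k]] := by
      rw [List.take_add_one, List.getElem?_eq_getElem hklt]; rfl
    unfold tsdCollect tsdTW
    rw [hget, htake]
    simp only [List.map_append, List.map_cons, List.map_nil, List.reverse_append,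
      List.reverse_cons, List.reverse_nil, List.nil_append, List.singleton_append,
      List.takeWhile_cons]
    by_cases hp : ts[k].2 = "DT"
    · simp [hp]
    · have hb : (!(ts[k].2 == "DT")) = true := by simp [hp]
      simp only [beq_iff_eq, hp, if_false, hb, if_true]
      rw [ih (by omega)]
      unfold tsdTW
      simp only [List.mem_cons, PySem.Set.mem_add]
      tauto

theorem tsd_slice_take (ts : List (String × String)) (i : Int) :
    PySem.List.slice ts none (some i) = ts.take (PySem.List.clampIdx ts.length i) := by
  simp [PySem.List.slice]

theorem tsd_j_clamp (n : Nat) (i : Int) :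
    (if (if i < 0 then i + n else i) > (n : Int) then (n : Int) else (if i < 0 then i + n else i)).toNat
      = PySem.List.clampIdx n i := by
  unfold PySem.List.clampIdx
  split_ifs <;> omega

-- ===== VERDICT (by name: the statement is the Claim_ definition above) =====
theorem tags_since_dt_spec : Claim_equal_tags_since_dt := by
  intro ts i _
  unfold Spec_tags_since_dt tags_since_dt tags_since_dt_alt
  dsimp only
  rw [tsd_j_clamp]
  have hkle : PySem.List.clampIdx ts.length i ≤ ts.length := by
    unfold PySem.List.clampIdx; split_ifs <;> omega
  rw [tsd_slice_take]
  congr 1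
  apply PySem.List.sorted_eq_sorted_of_perm _ _ _ (fun a b h => h)
  rw [List.perm_ext_iff_of_nodup
    (tsd_foldA_nodup _ _ (by simp [PySem.Set.empty]))
    (tsd_collect_nodup _ _ _ (by simp [PySem.Set.empty]))]
  intro x
  rw [tsd_foldA_mem, tsd_collect_mem ts _ hkle]
  simp [PySem.Set.empty]
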